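-- pv_equiv track=rewrite | github.com/weykon/blog-weykon-zola | scripts/analyze_blog_content.py | find_matching_db_post
-- ===== SOURCE A (Python) =====
-- from typing import Dict, List, Tuple
--
-- def find_matching_db_post(slug: str, title: str, db_posts: List[Dict]) -> Dict:
--     """Find matching post in database"""
--     # Exact slug match
--     for post in db_posts:
--         if post['slug'] == slug:
--             return post
--
--     # Partial slug match
--     for post in db_posts:
--         if slug in post['slug'] or post['slug'] in slug:
--             return post
--
--     # Title match (case insensitive, partial)
--     title_lower = title.lower()
--     for post in db_posts:
--         if title_lower in post['title'].lower() or post['title'].lower() in title_lower: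
--             return post
--
--     return None
-- ===== SOURCE B (Python) =====
-- def find_matching_db_post(slug, title, db_posts):
--     """Find matching post in database (one slug pass + lazy title pass)."""
--     # One pass over the slugs: return an exact match immediately, remember the
--     # first partial slug match as a fallback.
--     partial = None
--     for post in db_posts:
--         ps = post['slug']
--         if ps == slug:
--             return post
--         if partial is None and (slug in ps or ps in slug):
--             partial = post
--     if partial is not None:
--         return partial
--     # No slug match anywhere: title scan (case insensitive, partial).
--     title_lower = title.lower()
--     for post in db_posts:
--         tl = post['title'].lower()
--         if title_lower in tl or tl in title_lower:
--             return post
--     return None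
-- ===== Notes on version B (the rewrite author's own statement) =====
-- stated objective: alternative
-- what changed: A's two separate slug scans are merged into one pass that returns an exact slug match immediately while remembering the first partial slug match as a fallback; the case-insensitive title scan runs only if that pass found nothing, exactly as in A.
import Mathlib
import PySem

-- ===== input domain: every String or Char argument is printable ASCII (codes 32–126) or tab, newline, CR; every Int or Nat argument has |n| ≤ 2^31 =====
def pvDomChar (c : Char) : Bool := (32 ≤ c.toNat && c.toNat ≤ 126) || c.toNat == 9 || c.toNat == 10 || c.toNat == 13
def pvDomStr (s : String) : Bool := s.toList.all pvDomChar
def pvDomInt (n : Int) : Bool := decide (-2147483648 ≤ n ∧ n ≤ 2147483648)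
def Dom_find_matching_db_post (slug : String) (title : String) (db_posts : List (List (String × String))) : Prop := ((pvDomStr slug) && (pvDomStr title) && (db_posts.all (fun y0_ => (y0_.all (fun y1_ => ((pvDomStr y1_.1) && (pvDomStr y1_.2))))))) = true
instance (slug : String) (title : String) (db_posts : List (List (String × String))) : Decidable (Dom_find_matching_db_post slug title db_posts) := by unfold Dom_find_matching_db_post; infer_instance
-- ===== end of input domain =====

-- B merges A's two slug scans into ONE pass (return exact match at once, remember the
-- first partial slug match as a fallback) and runs the title scan only if that pass
-- found nothing, exactly as A does; objective: alternative decomposition, same cost.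

-- ===== PORT A =====
-- Transliterations of the three Python match conditions. Dict access post['slug'] /
-- post['title'] is getD here; under Pre_ the key is present wherever Python reads it,
-- so getD is exact there.
def condSlugEq (slug : String) (post : List (String × String)) : Bool :=
  (PySem.Dict.mk post).getD "slug" "" == slug

def condSlugPart (slug : String) (post : List (String × String)) : Bool :=
  PySem.Str.isIn slug ((PySem.Dict.mk post).getD "slug" "") ||
  PySem.Str.isIn ((PySem.Dict.mk post).getD "slug" "") slug

def condTitle (title_lower : String) (post : List (String × String)) : Bool :=
  PySem.Str.isIn title_lower (PySem.Str.lower ((PySem.Dict.mk post).getD "title" "")) ||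
  PySem.Str.isIn (PySem.Str.lower ((PySem.Dict.mk post).getD "title" "")) title_lower

-- A: three loops over db_posts, each returning its first hit ('for … if … return' = find?).
def find_matching_db_post (slug : String) (title : String) (db_posts : List (List (String × String))) : Option (List (String × String)) :=
  match db_posts.find? (condSlugEq slug) with
  | some post => some post
  | none =>
    match db_posts.find? (condSlugPart slug) with
    | some post => some post
    | none =>
      let title_lower := PySem.Str.lower title
      match db_posts.find? (condTitle title_lower) with
      | some post => some post
      | none => none

-- ===== PORT B =====
-- B's slug pass: returns an exact slug match immediately; 'partial' holds the first
-- partial slug match seen (set only while still None), returned after the loop.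
def bSlugPass (slug : String) :
    List (List (String × String)) → Option (List (String × String)) → Option (List (String × String))
  | [], partial_ => partial_
  | post :: rest, partial_ =>
    if condSlugEq slug post then some post
    else if partial_.isNone && condSlugPart slug post then bSlugPass slug rest (some post)
    else bSlugPass slug rest partial_

def find_matching_db_post_alt (slug : String) (title : String) (db_posts : List (List (String × String))) : Option (List (String × String)) :=
  match bSlugPass slug db_posts none with
  | some post => some post
  | none =>
    let title_lower := PySem.Str.lower title
    match db_posts.find? (condTitle title_lower) with
    | some post => some post
    | none => none

-- ===== PRECONDITION & SPEC =====
-- slugPrefixOk: every post up to (and including) the first exact slug match has a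
-- "slug" key — exactly what Python's first loop reads before returning.
def slugPrefixOk (slug : String) : List (List (String × String)) → Bool
  | [] => true
  | post :: rest =>
    (PySem.Dict.mk post).contains "slug" && (condSlugEq slug post || slugPrefixOk slug rest)

-- titlePrefixOk: every post up to (and including) the first title match has a "title" key.
def titlePrefixOk (title_lower : String) : List (List (String × String)) → Bool
  | [] => true
  | post :: rest =>
    (PySem.Dict.mk post).contains "title" && (condTitle title_lower post || titlePrefixOk title_lower rest)

-- Pre_ excludes exactly the inputs on which Python A raises KeyError (a missing "slug"
-- key read before any exact slug match, or — when no slug match exists at all — a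
-- missing "title" key read before any title match); B raises identically there.
def Pre_find_matching_db_post (slug : String) (title : String) (db_posts : List (List (String × String))) : Prop :=
  slugPrefixOk slug db_posts = true ∧
    (db_posts.any (fun p => condSlugEq slug p || condSlugPart slug p) = true ∨
     titlePrefixOk (PySem.Str.lower title) db_posts = true)
instance (slug : String) (title : String) (db_posts : List (List (String × String))) : Decidable (Pre_find_matching_db_post slug title db_posts) := by unfold Pre_find_matching_db_post; infer_instance

def pvWitness_find_matching_db_post : String × String × (List (List (String × String))) :=
  ("my-post", "My Post", [[("slug", "other"), ("title", "Other")], [("slug", "my-post-2"), ("title", "My Post Two")]])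

def Spec_find_matching_db_post (slug : String) (title : String) (db_posts : List (List (String × String))) (out : Option (List (String × String))) : Prop := out = find_matching_db_post_alt slug title db_posts
instance (slug : String) (title : String) (db_posts : List (List (String × String))) (out : Option (List (String × String))) : Decidable (Spec_find_matching_db_post slug title db_posts out) := by unfold Spec_find_matching_db_post; infer_instance

-- ===== CLAIM =====
def Claim_equal_find_matching_db_post : Prop := ∀ (slug : String) (title : String) (db_posts : List (List (String × String))), Dom_find_matching_db_post slug title db_posts → Pre_find_matching_db_post slug title db_posts → Spec_find_matching_db_post slug title db_posts (find_matching_db_post slug title db_posts)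

-- ===== LEMMAS AND PROOFS =====

-- Once 'partial' holds q, only an exact slug match can change the result.
theorem bSlugPass_some (slug : String) :
    ∀ (l : List (List (String × String))) (q : List (String × String)),
    bSlugPass slug l (some q) =
      match l.find? (condSlugEq slug) with
      | some r => some r
      | none => some q := by
  intro l
  induction l with
  | nil => intro q; simp [bSlugPass]
  | cons p rest ih =>
    intro q
    by_cases h0 : condSlugEq slug p
    · simp [bSlugPass, h0, List.find?]
    · simp [bSlugPass, h0, List.find?, ih]

-- From None, the slug pass computes A's first two loops: first exact match, else
-- first partial match, else none.
theorem bSlugPass_none (slug : String) :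
    ∀ (l : List (List (String × String))),
    bSlugPass slug l none =
      match l.find? (condSlugEq slug) with
      | some r => some r
      | none => l.find? (condSlugPart slug) := by
  intro l
  induction l with
  | nil => simp [bSlugPass]
  | cons p rest ih =>
    by_cases h0 : condSlugEq slug p
    · simp [bSlugPass, h0, List.find?]
    · by_cases h1 : condSlugPart slug p
      · simp [bSlugPass, h0, h1, List.find?, bSlugPass_some]
      · simp [bSlugPass, h0, h1, List.find?, ih]

-- ===== VERDICT =====
theorem find_matching_db_post_spec : Claim_equal_find_matching_db_post := by
  intro slug title db_posts _ _
  unfold Spec_find_matching_db_post find_matching_db_post find_matching_db_post_alt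
  rw [bSlugPass_none]
  cases h0 : db_posts.find? (condSlugEq slug) <;>
    cases h1 : db_posts.find? (condSlugPart slug) <;> simp
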